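-- pv_equiv track=rewrite | github.com/YurgenSlavniy/EducationRepo | python/parsing/jobparser_homework_androkotey/pipelines.py | __pseudo_space_handling
-- ===== SOURCE A (Python) =====
-- def __pseudo_space_handling(raw_salary):
--     pseudo_space_indexes = []
--     for i, letters in enumerate(zip(raw_salary[:-2], raw_salary[1:-1], raw_salary[2:])):
--         x, y, z = letters
--         if y == ' ' and x.isdigit() and z.isdigit():
--             pseudo_space_indexes.append(i)
--     temp = list(raw_salary)
--     for ind in pseudo_space_indexes:
--         temp[ind + 1] = '.'
--     raw_salary = ''.join(temp).replace('.', '')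
--     return raw_salary
-- ===== SOURCE B (Python) =====
-- def __pseudo_space_handling(raw_salary):
--     # single pass over the original string: drop every '.', and drop a space whose
--     # original neighbours are both digits (prev_digit tracks the ORIGINAL previous char)
--     out = []
--     prev_digit = False
--     n = len(raw_salary)
--     for i, c in enumerate(raw_salary):
--         if c == '.':
--             pass
--         elif c == ' ' and prev_digit and i + 1 < n and raw_salary[i + 1].isdigit():
--             pass
--         else:
--             out.append(c)
--         prev_digit = c.isdigit()
--     return ''.join(out)
-- ===== Notes on version B (the rewrite author's own statement) =====
-- stated objective: simpler
-- what changed: B replaces A's three-pass pipeline (build an index list from zipped slices, mutate a char list at those indexes, then a global replace) by one left-to-right pass that keeps a previous-char-is-digit flag and a one-char lookahead and emits directly into the output.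
import Mathlib
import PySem

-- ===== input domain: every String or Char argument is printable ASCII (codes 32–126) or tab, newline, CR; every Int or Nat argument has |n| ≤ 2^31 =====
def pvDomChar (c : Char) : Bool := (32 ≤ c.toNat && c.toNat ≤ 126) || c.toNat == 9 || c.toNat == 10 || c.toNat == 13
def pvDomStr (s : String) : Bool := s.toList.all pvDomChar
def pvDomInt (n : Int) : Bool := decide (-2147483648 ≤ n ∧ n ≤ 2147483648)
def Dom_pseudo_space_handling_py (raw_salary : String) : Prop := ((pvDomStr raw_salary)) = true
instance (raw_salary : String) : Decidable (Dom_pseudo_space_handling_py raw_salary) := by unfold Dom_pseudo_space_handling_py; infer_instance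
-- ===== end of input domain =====

-- B is a single pass with a previous-digit flag and one-char lookahead instead of A's
-- slice/zip index collection, list mutation and global replace; same return value.

-- ===== PORT A =====
def pseudo_space_handling_py (raw_salary : String) : String :=
  let cs := raw_salary.toList
  -- zip(raw_salary[:-2], raw_salary[1:-1], raw_salary[2:]) as nested pairs (x, (y, z))
  let triples := List.zip (PySem.List.slice cs none (some (-2)))
      (List.zip (PySem.List.slice cs (some 1) (some (-1))) (PySem.List.slice cs (some 2) none))
  let pseudo_space_indexes : List Int :=
    (PySem.List.enumerate triples 0).foldl
      (fun acc p =>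
        if p.2.2.1 == ' ' && PySem.Chars.isdigit p.2.1 && PySem.Chars.isdigit p.2.2.2
        then acc ++ [p.1] else acc) []
  let temp := pseudo_space_indexes.foldl (fun t ind => PySem.List.pySetD t (ind + 1) '.') cs
  PySem.Str.replace (String.ofList temp) "." ""

-- ===== PORT B =====
-- lookahead: 'i + 1 < len(s) and s[i+1].isdigit()' seen from position i is a test on the tail
def pvNextDig : List Char → Bool
  | z :: _ => PySem.Chars.isdigit z
  | [] => false

-- the loop of Source B: pd = "previous original char was a digit"
def pvAltGo (pd : Bool) : List Char → List Char
  | [] => []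
  | c :: r =>
    if c == '.' then pvAltGo (PySem.Chars.isdigit c) r
    else if c == ' ' && pd && pvNextDig r then pvAltGo (PySem.Chars.isdigit c) r
    else c :: pvAltGo (PySem.Chars.isdigit c) r

def pseudo_space_handling_py_alt (raw_salary : String) : String :=
  String.ofList (pvAltGo false raw_salary.toList)

-- ===== PRECONDITION & SPEC =====
def Spec_pseudo_space_handling_py (raw_salary : String) (out : String) : Prop := out = pseudo_space_handling_py_alt raw_salary
instance (raw_salary : String) (out : String) : Decidable (Spec_pseudo_space_handling_py raw_salary out) := by unfold Spec_pseudo_space_handling_py; infer_instance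

-- ===== CLAIM (what is proved, stated in full; the proofs are below) =====
def Claim_equal_pseudo_space_handling_py : Prop := ∀ (raw_salary : String), Dom_pseudo_space_handling_py raw_salary → Spec_pseudo_space_handling_py raw_salary (pseudo_space_handling_py raw_salary)

-- ===== LEMMAS AND PROOFS =====

-- the original string with each pseudo-space overwritten by '.', computed structurally
def pvMark (pd : Bool) : List Char → List Char
  | [] => []
  | c :: r =>
    (if c == ' ' && pd && pvNextDig r then '.' else c) :: pvMark (PySem.Chars.isdigit c) r

lemma pvNextDig_eq (r : List Char) : pvNextDig r = (r[0]?.map PySem.Chars.isdigit).getD false := by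
  cases r <;> simp [pvNextDig]

lemma pvAltGo_eq_filter_mark (cs : List Char) : ∀ pd, pvAltGo pd cs = (pvMark pd cs).filter (· != '.') := by
  induction cs with
  | nil => intro pd; rfl
  | cons c r ih =>
    intro pd
    by_cases hd : c = '.'
    · subst hd
      simp [pvAltGo, pvMark, pvNextDig, ih]
    · by_cases hsp : (c == ' ' && pd && pvNextDig r) = true
      · have hc : (c == '.') = false := by simp [hd]
        simp [pvAltGo, pvMark, hc, hsp, ih]
      · have hc : (c == '.') = false := by simp [hd]
        simp [pvAltGo, pvMark, hc, hsp, ih, hd]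

lemma pvReplaceGo (fuel : Nat) : ∀ (l acc : List Char), l.length ≤ fuel →
    PySem.Chars.replace.go ['.'] [] fuel l acc = acc.reverse ++ l.filter (· != '.') := by
  induction fuel with
  | zero =>
    intro l acc h
    have : l = [] := by cases l <;> simp_all
    subst this; simp [PySem.Chars.replace.go]
  | succ n ih =>
    intro l acc h
    cases l with
    | nil => simp [PySem.Chars.replace.go]
    | cons c t =>
      by_cases hc : c = '.'
      · subst hc
        have : (['.'].isPrefixOf ('.' :: t)) = true := by simp [List.isPrefixOf]
        simp [PySem.Chars.replace.go, this, ih t acc (by simpa using h)]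
      · have hp : (['.'].isPrefixOf (c :: t)) = false := by simp [List.isPrefixOf]; exact fun h => hc h.symm
        simp [PySem.Chars.replace.go, hp, ih t (c :: acc) (by simpa using h), hc]

lemma pvReplace_dot (l : List Char) : PySem.Chars.replace l ['.'] [] = l.filter (· != '.') := by
  simpa using pvReplaceGo l.length l [] le_rfl

lemma pvMark_getElem? (cs : List Char) : ∀ (pd : Bool) (j : Nat),
    (pvMark pd cs)[j]? = cs[j]?.map (fun c =>
      if c == ' ' && (if j = 0 then pd else PySem.Chars.isdigit (cs.getD (j-1) ' '))
           && (cs[j+1]?.map PySem.Chars.isdigit).getD false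
      then '.' else c) := by
  induction cs with
  | nil => intro pd j; simp [pvMark]
  | cons c r ih =>
    intro pd j
    cases j with
    | zero =>
      simp [pvMark, pvNextDig_eq]
    | succ j =>
      have := ih (PySem.Chars.isdigit c) j
      simp only [pvMark, List.getElem?_cons_succ, this]
      cases j with
      | zero => simp
      | succ k => simp

lemma pvFoldSet_getElem? (l : List Int) : ∀ (t : List Char), (∀ i ∈ l, 0 ≤ i) → ∀ (j : Nat),
    (l.foldl (fun t ind => PySem.List.pySetD t (ind + 1) '.') t)[j]? =
      t[j]?.map (fun c => if (j : Int) ∈ l.map (· + 1) then '.' else c) := by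
  induction l with
  | nil =>
    intro t _ j
    simp only [List.foldl_nil, List.map_nil, List.not_mem_nil, if_false]
    cases t[j]? <;> simp
  | cons i l ih =>
    intro t hl j
    have hi : 0 ≤ i := hl i (List.mem_cons_self ..)
    have hstep : (PySem.List.pySetD t (i + 1) '.')[j]? =
        t[j]?.map (fun c => if (j : Int) = i + 1 then '.' else c) := by
      rw [PySem.List.pySetD_of_nonneg t '.' (by omega : (0:Int) ≤ i + 1)]
      rw [List.getElem?_set]
      by_cases hj : (i+1).toNat = j
      · have hj' : (j:Int) = i + 1 := by omega
        subst hj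
        by_cases hlen : (i+1).toNat < t.length
        · rw [List.getElem?_eq_getElem hlen]
          simp [hlen, hj']
        · rw [List.getElem?_eq_none (by omega)]
          simp [hlen]
      · have hj' : ¬((j:Int) = i + 1) := by omega
        simp [hj, hj']
    rw [List.foldl_cons, ih _ (fun i hi => hl i (List.mem_cons_of_mem _ hi)) j, hstep]
    cases htj : t[j]? with
    | none => simp
    | some c =>
      simp only [Option.map_some, List.map_cons, List.mem_cons]
      by_cases hj : (j : Int) = i + 1 <;> by_cases hm : (j : Int) ∈ l.map (· + 1) <;>
        simp [hj, hm]

lemma pvTriples_length (cs : List Char) :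
    (List.zip (cs.take (cs.length - 2)) (List.zip ((cs.drop 1).take (cs.length - 2)) (cs.drop 2))).length
      = cs.length - 2 := by
  simp
  omega

lemma pvTriples_getElem (cs : List Char) (k : Nat) (hk : k < cs.length - 2) :
    (List.zip (cs.take (cs.length - 2)) (List.zip ((cs.drop 1).take (cs.length - 2)) (cs.drop 2)))[k]'(by rw [pvTriples_length]; exact hk)
      = (cs[k]'(by omega), (cs[k+1]'(by omega), cs[k+2]'(by omega))) := by
  simp [List.getElem_zip, List.getElem_take, List.getElem_drop]
  congr 1
  omega

lemma pvSlice_mid (cs : List Char) :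
    PySem.List.slice cs (some 1) (some (-1)) = (cs.drop 1).take (cs.length - 2) := by
  cases cs with
  | nil => rfl
  | cons c r =>
    simp [PySem.List.slice, PySem.List.clampIdx]
    split_ifs with h1
    · omega
    · omega

lemma pvSlice_from2 (cs : List Char) :
    PySem.List.slice cs (some 2) none = cs.drop 2 := by
  simp [PySem.List.slice, PySem.List.clampIdx]
  show List.take (cs.length - min 2 cs.length) (List.drop (min 2 cs.length) cs) = cs.drop 2
  rcases Nat.lt_or_ge cs.length 2 with h | h
  · rw [Nat.min_eq_right (by omega), List.drop_length, List.drop_eq_nil_iff.mpr (by omega)]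
    simp
  · rw [Nat.min_eq_left h, List.take_of_length_le (by simp)]

lemma pvIdxs_mem (cs : List Char) (q : Int) :
    q ∈ (List.filter (fun (p : Int × Char × Char × Char) => p.2.2.1 == ' ' && PySem.Chars.isdigit p.2.1 && PySem.Chars.isdigit p.2.2.2)
        (PySem.List.enumerate (List.zip (cs.take (cs.length-2)) (List.zip ((cs.drop 1).take (cs.length-2)) (cs.drop 2))) 0)).map (fun p => p.1) ↔
      ∃ k : Nat, k < cs.length - 2 ∧ q = (k : Int) ∧
        (cs.getD (k+1) ' ' == ' ' && PySem.Chars.isdigit (cs.getD k ' ') && PySem.Chars.isdigit (cs.getD (k+2) ' ')) = true := by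
  simp only [List.mem_map, List.mem_filter, PySem.List.mem_enumerate_iff]
  constructor
  · rintro ⟨p, ⟨⟨k, hk, hp⟩, hpcond⟩, hq⟩
    rw [pvTriples_length] at hk
    refine ⟨k, hk, ?_, ?_⟩
    · rw [← hq, hp]
      simp
    · rw [hp, pvTriples_getElem cs k hk] at hpcond
      simpa [List.getElem?_eq_getElem (show k < cs.length by omega),
             List.getElem?_eq_getElem (show k+1 < cs.length by omega),
             List.getElem?_eq_getElem (show k+2 < cs.length by omega)] using hpcond
  · rintro ⟨k, hk, hq, hcond⟩
    refine ⟨((k : Int), (cs[k]'(by omega), (cs[k+1]'(by omega), cs[k+2]'(by omega)))), ⟨⟨k, by rw [pvTriples_length]; exact hk, ?_⟩, ?_⟩, by simp [hq]⟩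
    · rw [pvTriples_getElem cs k hk]
      simp
    · simpa [List.getElem?_eq_getElem (show k < cs.length by omega),
             List.getElem?_eq_getElem (show k+1 < cs.length by omega),
             List.getElem?_eq_getElem (show k+2 < cs.length by omega)] using hcond

lemma pvA_temp_eq (cs : List Char) :
    (((PySem.List.enumerate (List.zip (cs.take (cs.length-2)) (List.zip ((cs.drop 1).take (cs.length-2)) (cs.drop 2))) 0).foldl
        (fun acc p => if p.2.2.1 == ' ' && PySem.Chars.isdigit p.2.1 && PySem.Chars.isdigit p.2.2.2 then acc ++ [p.1] else acc) ([]:List Int)).foldl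
      (fun t ind => PySem.List.pySetD t (ind + 1) '.') cs) = pvMark false cs := by
  rw [PySem.List.foldl_append_if (fun (p : Int × Char × Char × Char) => p.2.2.1 == ' ' && PySem.Chars.isdigit p.2.1 && PySem.Chars.isdigit p.2.2.2) (fun (p : Int × Char × Char × Char) => p.1)
      (PySem.List.enumerate (List.zip (cs.take (cs.length-2)) (List.zip ((cs.drop 1).take (cs.length-2)) (cs.drop 2))) 0) []]
  rw [List.nil_append]
  have hnn : ∀ i ∈ (List.filter (fun (p : Int × Char × Char × Char) => p.2.2.1 == ' ' && PySem.Chars.isdigit p.2.1 && PySem.Chars.isdigit p.2.2.2)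
        (PySem.List.enumerate (List.zip (cs.take (cs.length-2)) (List.zip ((cs.drop 1).take (cs.length-2)) (cs.drop 2))) 0)).map (fun p => p.1), (0:Int) ≤ i := by
    intro i hi
    rcases (pvIdxs_mem cs i).mp hi with ⟨k, _, hq, _⟩
    omega
  apply List.ext_getElem?
  intro j
  rw [pvFoldSet_getElem? _ cs hnn j, pvMark_getElem? cs false j]
  cases hcj : cs[j]? with
  | none => simp
  | some c =>
    have hjlen : j < cs.length := by
      by_contra h
      rw [List.getElem?_eq_none (by omega)] at hcj
      exact absurd hcj (by simp)
    have hc : cs[j]'hjlen = c := by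
      rw [List.getElem?_eq_getElem hjlen] at hcj
      exact Option.some.inj hcj
    simp only [Option.map_some]
    congr 1
    have hmm : ((j : Int) ∈ List.map (· + 1) (List.map (fun (p : Int × Char × Char × Char) => p.1) (List.filter (fun (p : Int × Char × Char × Char) => p.2.2.1 == ' ' && PySem.Chars.isdigit p.2.1 && PySem.Chars.isdigit p.2.2.2)
          (PySem.List.enumerate (List.zip (cs.take (cs.length-2)) (List.zip ((cs.drop 1).take (cs.length-2)) (cs.drop 2))) 0)))) ↔
        ∃ k : Nat, k < cs.length - 2 ∧ (j : Int) = (k : Int) + 1 ∧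
          (cs.getD (k+1) ' ' == ' ' && PySem.Chars.isdigit (cs.getD k ' ') && PySem.Chars.isdigit (cs.getD (k+2) ' ')) = true := by
      simp only [List.mem_map]
      constructor
      · rintro ⟨q, hq, hq1⟩
        rcases (pvIdxs_mem cs q).mp (List.mem_map.mpr hq) with ⟨k, hk, rfl, hcond⟩
        exact ⟨k, hk, hq1.symm, hcond⟩
      · rintro ⟨k, hk, hj, hcond⟩
        exact ⟨(k : Int), List.mem_map.mp ((pvIdxs_mem cs (k : Int)).mpr ⟨k, hk, rfl, hcond⟩), hj.symm⟩
    by_cases hB : ∃ k : Nat, k < cs.length - 2 ∧ (j : Int) = (k : Int) + 1 ∧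
          (cs.getD (k+1) ' ' == ' ' && PySem.Chars.isdigit (cs.getD k ' ') && PySem.Chars.isdigit (cs.getD (k+2) ' ')) = true
    · rcases hB with ⟨k, hk, hj, hcond⟩
      have hjk : j = k + 1 := by omega
      subst hjk
      have hj0 : ¬ (k + 1 = 0) := by omega
      rw [if_pos (hmm.mpr ⟨k, hk, by omega, hcond⟩)]
      have h1 : cs.getD (k+1) ' ' = c := by
        rw [List.getD_eq_getElem cs ' ' (show k+1 < cs.length by omega), hc]
      rw [h1] at hcond
      have h2 : cs.getD (k + 1 - 1) ' ' = cs.getD k ' ' := by norm_num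
      have h3 : cs[k+1+1]? = some (cs.getD (k+2) ' ') := by
        rw [List.getD_eq_getElem cs ' ' (show k+2 < cs.length by omega)]
        exact List.getElem?_eq_getElem (by omega)
      rw [if_pos]
      simp only [hj0, if_false, h2, h3, Option.map_some, Option.getD_some]
      simp only [Bool.and_eq_true] at hcond ⊢
      exact ⟨⟨hcond.1.1, hcond.1.2⟩, hcond.2⟩
    · rw [if_neg (fun h => hB (hmm.mp h))]
      rw [if_neg]
      intro hcond
      apply hB
      -- from the mark-side condition build a witness k = j - 1
      have hj0 : j ≠ 0 := by
        intro h; subst h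
        simp at hcond
      obtain ⟨k, rfl⟩ : ∃ k, j = k + 1 := ⟨j - 1, by omega⟩
      simp only [Bool.and_eq_true] at hcond
      have hnext := hcond.2
      have hk2 : k + 2 < cs.length := by
        by_contra h
        rw [List.getElem?_eq_none (by omega)] at hnext
        simp at hnext
      refine ⟨k, by omega, by omega, ?_⟩
      have e1 : cs.getD (k+1) ' ' = c := by
        rw [List.getD_eq_getElem cs ' ' (show k+1 < cs.length by omega), hc]
      have e2 : cs.getD (k+1-1) ' ' = cs.getD k ' ' := by norm_num
      have e3 : cs[k+1+1]? = some (cs.getD (k+2) ' ') := by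
        rw [List.getD_eq_getElem cs ' ' hk2]
        exact List.getElem?_eq_getElem (by omega)
      rw [e3] at hnext
      simp only [Option.map_some, Option.getD_some] at hnext
      simp only [hj0, if_false, e2] at hcond
      simp only [Bool.and_eq_true, e1]
      exact ⟨⟨hcond.1.1, hcond.1.2⟩, hnext⟩


theorem pv_AB (s : String) : pseudo_space_handling_py s = pseudo_space_handling_py_alt s := by
  unfold pseudo_space_handling_py pseudo_space_handling_py_alt
  apply String.toList_inj.mp
  rw [PySem.Str.toList_replace]
  have hdot : (".").toList = ['.'] := rfl
  have hnil : ("").toList = [] := rfl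
  rw [hdot, hnil, String.toList_ofList, String.toList_ofList, pvReplace_dot]
  rw [PySem.List.slice_to_neg_ofNat s.toList 2 (by norm_num), pvSlice_mid, pvSlice_from2]
  rw [pvA_temp_eq s.toList, pvAltGo_eq_filter_mark]

-- ===== VERDICT (by name: the statement is the Claim_ definition above) =====
theorem pseudo_space_handling_py_spec : Claim_equal_pseudo_space_handling_py := by
  intro s _
  unfold Spec_pseudo_space_handling_py
  exact pv_AB s
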